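-- pv_equiv track=rewrite | github.com/calvinator42000/AoC | 2015/11_day/1_pt/main.py | incPass
-- ===== SOURCE A (Python) =====
-- new_alpha = 'abcdefghjkmnpqrstuvwxyz'
--
-- def incPass(password):
--     next_pass = list(password)
--     carry_over = True
--     pass_index = len(password)-1
--     while carry_over:
--         if next_pass[pass_index] == 'z':
--             pass_index -= 1
--         else:
--             while pass_index < len(password):
--                 next_pass[pass_index] = new_alpha[(new_alpha.index(next_pass[pass_index])+1) % 23]
--                 pass_index += 1
--             carry_over = False
--     return "".join(next_pass)
-- ===== SOURCE B (Python) =====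
-- new_alpha = 'abcdefghjkmnpqrstuvwxyz'
--
-- def incPass(password):
--     stripped = password.rstrip('z')
--     num_z = len(password) - len(stripped)
--     last = stripped[-1]
--     return stripped[:-1] + new_alpha[(new_alpha.index(last) + 1) % 23] + 'a' * num_z
-- ===== Notes on version B (the rewrite author's own statement) =====
-- stated objective: simpler
-- what changed: Replaces A's two nested while loops with index bookkeeping by a direct slice-based construction: rstrip the trailing 'z's, increment the last remaining letter in the skip-letter alphabet, and append the corresponding run of 'a's.
import Mathlib
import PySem

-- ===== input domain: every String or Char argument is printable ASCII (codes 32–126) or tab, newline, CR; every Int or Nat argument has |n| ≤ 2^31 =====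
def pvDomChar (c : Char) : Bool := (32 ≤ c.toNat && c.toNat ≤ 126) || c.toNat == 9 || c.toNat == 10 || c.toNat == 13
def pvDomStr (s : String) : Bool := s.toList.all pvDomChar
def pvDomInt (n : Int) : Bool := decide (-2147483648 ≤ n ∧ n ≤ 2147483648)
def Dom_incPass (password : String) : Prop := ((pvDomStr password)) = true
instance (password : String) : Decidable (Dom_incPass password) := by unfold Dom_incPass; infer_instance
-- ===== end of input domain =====

-- B replaces A's nested while loops by a slice-based construction (strip trailing 'z', bump last letter, append 'a's); objective: simpler.


-- ===== PORT A =====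
def newAlphaA : List Char := "abcdefghjkmnpqrstuvwxyz".toList

-- one body of A's inner loop: next_pass[pass_index] = new_alpha[(new_alpha.index(next_pass[pass_index])+1) % 23]
-- (index? returns a Nat, so Nat's % here equals Python's % on this nonnegative value)
def pvStepA (xs : List Char) (i : Int) : Option (List Char) :=
  match PySem.List.pyGet? xs i with
  | none => none                                       -- IndexError
  | some c =>
    match PySem.List.index? newAlphaA c with
    | none => none                                     -- ValueError from new_alpha.index
    | some k => PySem.List.pySet? xs i (newAlphaA.getD ((k + 1) % 23) ' ')

-- A's inner 'while pass_index < len(password)' loop (fuel only guards termination; none = exception)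
def pvInnerA (xs : List Char) (i : Int) : Nat → Option (List Char)
  | 0 => none
  | fuel + 1 =>
    if i < (xs.length : Int) then
      match pvStepA xs i with
      | none => none
      | some xs' => pvInnerA xs' (i + 1) fuel
    else some xs

-- A's outer 'while carry_over' loop (fuel only guards termination; none = exception)
def pvOuterA (xs : List Char) (i : Int) : Nat → Option (List Char)
  | 0 => none
  | fuel + 1 =>
    match PySem.List.pyGet? xs i with
    | none => none                                     -- IndexError
    | some c =>
      if c = 'z' then pvOuterA xs (i - 1) fuel
      else pvInnerA xs i (2 * xs.length + 1)

def pvRunA (cs : List Char) : String :=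
  match pvOuterA cs ((cs.length : Int) - 1) (2 * cs.length + 2) with
  | none => ""                                         -- an exception was raised; excluded by Pre_
  | some r => String.ofList r

def incPass (password : String) : String := pvRunA password.toList

-- ===== PORT B =====
def newAlphaB : List Char := "abcdefghjkmnpqrstuvwxyz".toList

def pvRunB (cs : List Char) : String :=
  -- password.rstrip('z'): ported by hand as reverse/dropWhile/reverse — exact for a single strip character
  let stripped := (cs.reverse.dropWhile (· = 'z')).reverse
  let numZ := cs.length - stripped.length
  match PySem.List.pyGet? stripped (-1) with           -- stripped[-1]; none = IndexError
  | none => ""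
  | some last =>
    match PySem.List.index? newAlphaB last with        -- new_alpha.index(last); none = ValueError
    | none => ""
    | some k =>
      String.ofList (stripped.dropLast ++ [newAlphaB.getD ((k + 1) % 23) ' '] ++ List.replicate numZ 'a')

def incPass_alt (password : String) : String := pvRunB password.toList

-- ===== PRECONDITION & SPEC =====
-- Pre_ excludes exactly the inputs on which A raises: empty or all-'z' passwords (IndexError) and
-- passwords whose last non-'z' character is outside the 23-letter alphabet (ValueError).
def Pre_incPass (password : String) : Prop :=
  (password.toList.reverse.dropWhile (· = 'z')).headD ' ' ∈ "abcdefghjkmnpqrstuvwxyz".toList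
instance (password : String) : Decidable (Pre_incPass password) := by unfold Pre_incPass; infer_instance

def pvWitness_incPass : String := "az"

def Spec_incPass (password : String) (out : String) : Prop := out = incPass_alt password
instance (password : String) (out : String) : Decidable (Spec_incPass password out) := by unfold Spec_incPass; infer_instance

-- ===== CLAIM (what is proved, stated in full; the proofs are below) =====
def Claim_equal_incPass : Prop := ∀ (password : String), Dom_incPass password → Pre_incPass password → Spec_incPass password (incPass password)

-- ===== LEMMAS AND PROOFS =====

-- the inner loop over the trailing run of 'z': each 'z' becomes 'a'
theorem pvInnerA_zrun (m : Nat) : ∀ (q : List Char) (fuel : Nat), m + 1 ≤ fuel →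
    pvInnerA (q ++ List.replicate m 'z') (q.length : Int) fuel
      = some (q ++ List.replicate m 'a') := by
  induction m with
  | zero => intro q fuel hf
            match fuel, hf with
            | fuel + 1, _ => simp [pvInnerA]
  | succ n ih =>
    intro q fuel hf
    match fuel, hf with
    | fuel + 1, hf =>
      have hlt : (q.length : Int) < ((q ++ List.replicate (n+1) 'z').length : Int) := by
        simp
      have hget : PySem.List.pyGet? (q ++ List.replicate (n+1) 'z') (q.length : Int) = some 'z' := by
        rw [PySem.List.pyGet?_natCast]
        simp [List.replicate_succ]
      have hidx : PySem.List.index? newAlphaA 'z' = some 22 := by decide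
      have hset : PySem.List.pySet? (q ++ List.replicate (n+1) 'z') (q.length : Int) (newAlphaA.getD ((22 + 1) % 23) ' ')
          = some ((q ++ ['a']) ++ List.replicate n 'z') := by
        rw [PySem.List.pySet?_natCast _ _ _ (by simp)]
        simp [List.replicate_succ]
        decide
      rw [pvInnerA]
      rw [if_pos hlt]
      simp only [pvStepA, hget, hidx, hset]
      have := ih (q ++ ['a']) fuel (by omega)
      simp at this ⊢
      rw [show ((q.length : Int) + 1) = ((q ++ ['a']).length : Int) by simp] at *
      rw [this]
      simp [List.replicate_succ]

-- the inner loop starting at the last non-'z' character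
theorem pvInnerA_main (p : List Char) (c : Char) (k m fuel : Nat)
    (hk : PySem.List.index? newAlphaA c = some k) (hfuel : m + 2 ≤ fuel) :
    pvInnerA (p ++ c :: List.replicate m 'z') (p.length : Int) fuel
      = some (p ++ newAlphaA.getD ((k + 1) % 23) ' ' :: List.replicate m 'a') := by
  match fuel, hfuel with
  | fuel + 1, hfuel =>
    have hlt : (p.length : Int) < ((p ++ c :: List.replicate m 'z').length : Int) := by simp
    have hget : PySem.List.pyGet? (p ++ c :: List.replicate m 'z') (p.length : Int) = some c := by
      rw [PySem.List.pyGet?_natCast]; simp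
    have hset : PySem.List.pySet? (p ++ c :: List.replicate m 'z') (p.length : Int)
          (newAlphaA.getD ((k + 1) % 23) ' ')
        = some ((p ++ [newAlphaA.getD ((k + 1) % 23) ' ']) ++ List.replicate m 'z') := by
      rw [PySem.List.pySet?_natCast _ _ _ (by simp)]
      simp
    rw [pvInnerA, if_pos hlt]
    simp only [pvStepA, hget, hk, hset]
    have := pvInnerA_zrun m (p ++ [newAlphaA.getD ((k + 1) % 23) ' ']) fuel (by omega)
    rw [show ((p.length : Int) + 1) = (((p ++ [newAlphaA.getD ((k + 1) % 23) ' ']).length : Int)) by simp] at *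
    rw [this]
    simp

-- the outer loop walks left over the trailing 'z's and then runs the inner loop at the last non-'z'
theorem pvOuterA_scan (p : List Char) (c : Char) (m : Nat) (hc : c ≠ 'z') :
    ∀ (j fuel : Nat), j ≤ m → j + 1 ≤ fuel →
    pvOuterA (p ++ c :: List.replicate m 'z') ((p.length + j : Nat) : Int) fuel
      = pvInnerA (p ++ c :: List.replicate m 'z') (p.length : Int)
          (2 * (p ++ c :: List.replicate m 'z').length + 1) := by
  intro j
  induction j with
  | zero =>
    intro fuel _ hf
    match fuel, hf with
    | fuel + 1, _ =>
      have hget : PySem.List.pyGet? (p ++ c :: List.replicate m 'z') ((p.length + 0 : Nat) : Int) = some c := by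
        rw [PySem.List.pyGet?_natCast]; simp
      rw [pvOuterA]
      simp only [hget, if_neg hc]
      norm_num
  | succ n ih =>
    intro fuel hj hf
    match fuel, hf with
    | fuel + 1, hf =>
      have hget : PySem.List.pyGet? (p ++ c :: List.replicate m 'z') ((p.length + (n+1) : Nat) : Int) = some 'z' := by
        rw [PySem.List.pyGet?_natCast, List.getElem?_append_right (by simp)]
        have h2 : p.length + (n + 1) - p.length = n + 1 := by omega
        rw [h2]
        simp [List.getElem?_replicate]
        omega
      rw [pvOuterA]
      simp only [hget]
      have harith : ((p.length + (n+1) : Nat) : Int) - 1 = ((p.length + n : Nat) : Int) := by push_cast; ring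
      rw [harith]
      exact ih fuel (by omega) (by omega)

-- the two pipelines agree on the list of characters, under the precondition
theorem pvRun_eq (cs : List Char)
    (hpre : (cs.reverse.dropWhile (· = 'z')).headD ' ' ∈ "abcdefghjkmnpqrstuvwxyz".toList) :
    pvRunA cs = pvRunB cs := by
  obtain ⟨c, rest, hteq⟩ : ∃ c rest, cs.reverse.dropWhile (· = 'z') = c :: rest := by
    cases h : cs.reverse.dropWhile (· = 'z') with
    | nil => rw [h] at hpre; exact absurd hpre (by decide)
    | cons a l => exact ⟨a, l, rfl⟩
  have hcz : c ≠ 'z' := by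
    have h2 := List.head?_dropWhile_not (p := (· = 'z')) (l := cs.reverse)
    rw [hteq] at h2; simp at h2; exact h2
  have hcmem : c ∈ newAlphaA := by rw [hteq] at hpre; simpa [newAlphaA] using hpre
  obtain ⟨k, hk⟩ : ∃ k, PySem.List.index? newAlphaA c = some k :=
    Option.isSome_iff_exists.mp ((PySem.List.index?_isSome_iff (xs := newAlphaA) (v := c)).mpr hcmem)
  set m := (cs.reverse.takeWhile (· = 'z')).length with hm
  have hrep : cs.reverse.takeWhile (· = 'z') = List.replicate m 'z' := by
    apply List.eq_replicate_of_mem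
    intro b hb
    simpa using List.mem_takeWhile_imp hb
  have hsplit : cs = rest.reverse ++ c :: List.replicate m 'z' := by
    have h3 : cs.reverse.reverse = (cs.reverse.takeWhile (· = 'z') ++ cs.reverse.dropWhile (· = 'z')).reverse := by
      rw [List.takeWhile_append_dropWhile]
    rw [List.reverse_reverse, hrep, hteq] at h3
    simpa using h3
  have hlen : cs.length = rest.reverse.length + 1 + m := by rw [hsplit]; simp; omega
  have hA : pvRunA cs = String.ofList (rest.reverse ++ newAlphaA.getD ((k + 1) % 23) ' ' :: List.replicate m 'a') := by
    unfold pvRunA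
    have h1 : ((cs.length : Int) - 1) = ((rest.reverse.length + m : Nat) : Int) := by
      rw [hlen]; push_cast; ring
    rw [h1, hsplit]
    rw [pvOuterA_scan rest.reverse c m hcz m _ le_rfl (by simp; omega)]
    rw [pvInnerA_main rest.reverse c k m _ hk (by simp; omega)]
  have hB : pvRunB cs = String.ofList (rest.reverse ++ [newAlphaA.getD ((k + 1) % 23) ' '] ++ List.replicate m 'a') := by
    unfold pvRunB
    have hstr : (cs.reverse.dropWhile (· = 'z')).reverse = rest.reverse ++ [c] := by
      rw [hteq]; simp
    simp only [hstr]
    rw [PySem.List.pyGet?_neg_one_append_singleton]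
    rw [show newAlphaB = newAlphaA from rfl]
    have hk' : List.idxOf? c newAlphaA = some k := by simpa using hk
    simp [hk', hlen]
  rw [hA, hB]
  simp

-- ===== VERDICT (by name: the statement is the Claim_ definition above) =====
theorem incPass_spec : Claim_equal_incPass := by
  intro password _ hpre
  unfold Pre_incPass at hpre
  unfold Spec_incPass incPass incPass_alt
  exact pvRun_eq password.toList hpre
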